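-- pv_equiv track=rewrite | github.com/SnehaPlayground/maa-protocol | scripts/maa_dashboard.py | build_task_snapshot
-- ===== SOURCE A (Python) =====
-- DARK_BLUE = '#1a3a5c'
--
-- MID_BLUE  = '#2d6a9f'
--
-- WHITE     = '#ffffff'
--
-- TEXT_DARK = '#1a1a2e'
--
-- TEXT_MUTED= '#6c7a89'
--
-- def build_task_snapshot(metrics, running):
--     from collections import Counter
--     tasks = metrics.get('tasks', [])
--     status_counts = Counter(t.get('status', 'unknown') for t in tasks)
--     total      = len(tasks)
--     completed  = status_counts.get('completed', 0)
--     running_ct = len(running.get('task_ids', []))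
--
--     def chip(count, label):
--         return (f'<div style="text-align:center;padding:10px 0;flex:1;min-width:80px;">'
--                 f'<div style="font-size:22px;font-weight:700;color:{TEXT_DARK};">{count}</div>'
--                 f'<div style="font-size:11px;color:{TEXT_MUTED};text-transform:uppercase;letter-spacing:0.5px;margin-top:2px;">{label}</div>'
--                 f'</div>')
--
--     chips = (f'<div style="display:flex;gap:0;flex-wrap:wrap;border-top:1px solid #dde3ea;">'
--              f'{chip(total, "Total")}'
--              f'<div style="width:1px;background:#dde3ea;"></div>'
--              f'{chip(completed, "Completed")}'
--              f'<div style="width:1px;background:#dde3ea;"></div>'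
--              f'{chip(running_ct, "Running")}'
--              f'<div style="width:1px;background:#dde3ea;"></div>'
--              f'{chip(status_counts.get("pending",0), "Pending")}'
--              f'<div style="width:1px;background:#dde3ea;"></div>'
--              f'{chip(status_counts.get("queued",0), "Queued")}'
--              f'</div>')
--
--     return f"""<div style="background:{WHITE};border-radius:10px;border:1px solid #dde3ea;margin-bottom:20px;overflow:hidden;">
--   <div style="background:{DARK_BLUE};color:{WHITE};padding:10px 18px;font-size:13px;font-weight:600;letter-spacing:0.5px;text-transform:uppercase;display:flex;justify-content:space-between;align-items:center;">
--     Task Snapshot <span style="background:{MID_BLUE};color:{WHITE};border-radius:10px;padding:2px 8px;font-size:11px;">live</span>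
--   </div>
--   <div style="padding:16px 20px;">{chips}</div>
-- </div>"""
-- ===== SOURCE B (Python) =====
-- DARK_BLUE = '#1a3a5c'
-- MID_BLUE  = '#2d6a9f'
-- WHITE     = '#ffffff'
-- TEXT_DARK = '#1a1a2e'
-- TEXT_MUTED= '#6c7a89'
--
-- _DIVIDER = '<div style="width:1px;background:#dde3ea;"></div>'
--
-- def _chip(count, label):
--     return (f'<div style="text-align:center;padding:10px 0;flex:1;min-width:80px;">'
--             f'<div style="font-size:22px;font-weight:700;color:{TEXT_DARK};">{count}</div>'
--             f'<div style="font-size:11px;color:{TEXT_MUTED};text-transform:uppercase;letter-spacing:0.5px;margin-top:2px;">{label}</div>'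
--             f'</div>')
--
-- def _rle(xs):
--     """Run-length encode a sorted list: one (value, run length) pair per distinct value."""
--     groups = []
--     i = 0
--     n = len(xs)
--     while i < n:
--         j = i + 1
--         while j < n and xs[j] == xs[i]:
--             j += 1
--         groups.append((xs[i], j - i))
--         i = j
--     return groups
--
-- def build_task_snapshot(metrics, running):
--     tasks = metrics.get('tasks', [])
--     # sort-then-group: sorted statuses make equal statuses adjacent, so one
--     # run-length pass yields an exact per-status frequency table
--     groups = _rle(sorted(t.get('status', 'unknown') for t in tasks))
--
--     def lookup(status):
--         for s, k in groups:
--             if s == status: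
--                 return k
--         return 0
--
--     entries = [
--         (len(tasks), 'Total'),
--         (lookup('completed'), 'Completed'),
--         (len(running.get('task_ids', [])), 'Running'),
--         (lookup('pending'), 'Pending'),
--         (lookup('queued'), 'Queued'),
--     ]
--     chips = ('<div style="display:flex;gap:0;flex-wrap:wrap;border-top:1px solid #dde3ea;">'
--              + _DIVIDER.join(_chip(c, l) for c, l in entries)
--              + '</div>')
--
--     return f"""<div style="background:{WHITE};border-radius:10px;border:1px solid #dde3ea;margin-bottom:20px;overflow:hidden;">
--   <div style="background:{DARK_BLUE};color:{WHITE};padding:10px 18px;font-size:13px;font-weight:600;letter-spacing:0.5px;text-transform:uppercase;display:flex;justify-content:space-between;align-items:center;">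
--     Task Snapshot <span style="background:{MID_BLUE};color:{WHITE};border-radius:10px;padding:2px 8px;font-size:11px;">live</span>
--   </div>
--   <div style="padding:16px 20px;">{chips}</div>
-- </div>"""
-- ===== Notes on version B (the rewrite author's own statement) =====
-- stated objective: alternative
-- what changed: B replaces A's Counter hash frequency table by sorting the status list and run-length encoding the sorted list, then reads each chip's count by scanning that small group list, and joins the chip row from an entries list instead of explicit interleaved concatenation.
import Mathlib
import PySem

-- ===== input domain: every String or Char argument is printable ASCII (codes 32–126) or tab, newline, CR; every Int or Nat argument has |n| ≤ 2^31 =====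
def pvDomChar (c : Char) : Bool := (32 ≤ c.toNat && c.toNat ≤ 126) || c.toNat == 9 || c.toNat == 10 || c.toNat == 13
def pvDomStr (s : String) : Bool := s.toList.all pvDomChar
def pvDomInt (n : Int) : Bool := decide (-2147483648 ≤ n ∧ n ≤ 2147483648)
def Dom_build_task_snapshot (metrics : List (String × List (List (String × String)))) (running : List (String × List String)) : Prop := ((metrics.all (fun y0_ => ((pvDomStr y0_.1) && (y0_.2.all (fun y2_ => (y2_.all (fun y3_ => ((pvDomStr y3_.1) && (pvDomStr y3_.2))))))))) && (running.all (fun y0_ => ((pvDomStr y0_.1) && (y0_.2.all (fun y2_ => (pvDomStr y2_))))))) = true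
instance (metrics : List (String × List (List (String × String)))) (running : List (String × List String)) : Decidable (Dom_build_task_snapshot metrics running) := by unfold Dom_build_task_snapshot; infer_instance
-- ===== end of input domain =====

-- B replaces A's Counter hash table by sort + run-length grouping with a scan lookup (objective: alternative; same HTML output).
-- ===== PORT A =====
def pvDARK_BLUE : String := "#1a3a5c"
def pvMID_BLUE : String := "#2d6a9f"
def pvWHITE : String := "#ffffff"
def pvTEXT_DARK : String := "#1a1a2e"
def pvTEXT_MUTED : String := "#6c7a89"

-- chip: identical local helper in both Pythons, defined once here and used by both ports
def pvChip (count : Int) (label : String) : String :=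
  "<div style=\"text-align:center;padding:10px 0;flex:1;min-width:80px;\">"
  ++ "<div style=\"font-size:22px;font-weight:700;color:" ++ pvTEXT_DARK ++ ";\">" ++ PySem.Int.toStr count ++ "</div>"
  ++ "<div style=\"font-size:11px;color:" ++ pvTEXT_MUTED ++ ";text-transform:uppercase;letter-spacing:0.5px;margin-top:2px;\">" ++ label ++ "</div>"
  ++ "</div>"

-- the outer f-string template around {chips}, identical in both Pythons
def pvTemplate (chips : String) : String :=
  "<div style=\"background:" ++ pvWHITE ++ ";border-radius:10px;border:1px solid #dde3ea;margin-bottom:20px;overflow:hidden;\">\n  <div style=\"background:" ++ pvDARK_BLUE ++ ";color:" ++ pvWHITE ++ ";padding:10px 18px;font-size:13px;font-weight:600;letter-spacing:0.5px;text-transform:uppercase;display:flex;justify-content:space-between;align-items:center;\">\n    Task Snapshot <span style=\"background:" ++ pvMID_BLUE ++ ";color:" ++ pvWHITE ++ ";border-radius:10px;padding:2px 8px;font-size:11px;\">live</span>\n  </div>\n  <div style=\"padding:16px 20px;\">" ++ chips ++ "</div>\n</div>"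

def build_task_snapshot (metrics : List (String × List (List (String × String)))) (running : List (String × List String)) : String :=
  let tasks := (PySem.Dict.mk metrics).getD "tasks" []
  let status_counts := PySem.Dict.counter (tasks.map (fun t => (PySem.Dict.mk t).getD "status" "unknown"))
  let total : Int := tasks.length
  let completed : Int := status_counts.getD "completed" 0
  let running_ct : Int := ((PySem.Dict.mk running).getD "task_ids" []).length
  let chips :=
    "<div style=\"display:flex;gap:0;flex-wrap:wrap;border-top:1px solid #dde3ea;\">"
    ++ pvChip total "Total"
    ++ "<div style=\"width:1px;background:#dde3ea;\"></div>"
    ++ pvChip completed "Completed"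
    ++ "<div style=\"width:1px;background:#dde3ea;\"></div>"
    ++ pvChip running_ct "Running"
    ++ "<div style=\"width:1px;background:#dde3ea;\"></div>"
    ++ pvChip (status_counts.getD "pending" 0) "Pending"
    ++ "<div style=\"width:1px;background:#dde3ea;\"></div>"
    ++ pvChip (status_counts.getD "queued" 0) "Queued"
    ++ "</div>"
  pvTemplate chips

-- ===== PORT B =====
def pvDIVIDER : String := "<div style=\"width:1px;background:#dde3ea;\"></div>"

-- _rle: the two-index while loop of Source B; each outer step consumes one maximal run of
-- equal elements at the front — here the loop over the suffix is the structural recursion,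
-- and the inner counting loop is takeWhile/dropWhile of the run
def pvRle : List String → List (String × Int)
  | [] => []
  | h :: t =>
    let run := t.takeWhile (· == h)
    let rest := t.dropWhile (· == h)
    (h, 1 + run.length) :: pvRle rest
  termination_by xs => xs.length
  decreasing_by
    simp only [List.length_cons]
    exact Nat.lt_succ_of_le (List.Sublist.length_le (List.dropWhile_sublist _))

-- lookup: the 'for s, k in groups: if s == status: return k / return 0' scan
def pvLookup (groups : List (String × Int)) (status : String) : Int :=
  match groups with
  | [] => 0
  | (s, k) :: rest => if s == status then k else pvLookup rest status

def build_task_snapshot_alt (metrics : List (String × List (List (String × String)))) (running : List (String × List String)) : String :=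
  let tasks := (PySem.Dict.mk metrics).getD "tasks" []
  let groups := pvRle (PySem.List.sorted (tasks.map (fun t => (PySem.Dict.mk t).getD "status" "unknown")) (fun x => x) false)
  let entries : List (Int × String) :=
    [ ((tasks.length : Int), "Total"),
      (pvLookup groups "completed", "Completed"),
      ((((PySem.Dict.mk running).getD "task_ids" []).length : Int), "Running"),
      (pvLookup groups "pending", "Pending"),
      (pvLookup groups "queued", "Queued") ]
  let chips :=
    "<div style=\"display:flex;gap:0;flex-wrap:wrap;border-top:1px solid #dde3ea;\">"
    ++ PySem.Str.join pvDIVIDER (entries.map (fun e => pvChip e.1 e.2))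
    ++ "</div>"
  pvTemplate chips

-- ===== PRECONDITION & SPEC =====
def Spec_build_task_snapshot (metrics : List (String × List (List (String × String)))) (running : List (String × List String)) (out : String) : Prop := out = build_task_snapshot_alt metrics running
instance (metrics : List (String × List (List (String × String)))) (running : List (String × List String)) (out : String) : Decidable (Spec_build_task_snapshot metrics running out) := by unfold Spec_build_task_snapshot; infer_instance

-- ===== CLAIM (what is proved, stated in full; the proofs are below) =====
def Claim_equal_build_task_snapshot : Prop := ∀ (metrics : List (String × List (List (String × String)))) (running : List (String × List String)), Dom_build_task_snapshot metrics running → Spec_build_task_snapshot metrics running (build_task_snapshot metrics running)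

-- ===== LEMMAS AND PROOFS =====

-- the run-length suffix after the first run contains no further copies of the head (sortedness)
lemma count_dropWhile_eq_zero (h : String) (t : List String) (hp : (h :: t).Pairwise (· ≤ ·)) :
    (t.dropWhile (· == h)).count h = 0 := by
  rw [List.count_eq_zero]
  intro hmem
  cases hrest : t.dropWhile (· == h) with
  | nil => simp [hrest] at hmem
  | cons r rs =>
    have hr : ¬ (r == h) = true := by
      have := List.head?_dropWhile_not (· == h) t
      rw [hrest] at this; simpa using this
    have hne : r ≠ h := by simpa using hr
    have hsub : (r :: rs).Sublist t := hrest ▸ List.dropWhile_sublist _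
    have hpt : (r :: rs).Pairwise (· ≤ ·) := (hp.of_cons).sublist hsub
    have hle : h ≤ r := (List.pairwise_cons.mp hp).1 r (hsub.subset (by simp))
    have hlt : h < r := lt_of_le_of_ne hle (fun e => hne e.symm)
    rw [hrest] at hmem
    rcases List.mem_cons.mp hmem with hmem1 | hmem1
    · exact hne hmem1.symm
    · have : r ≤ h := (List.pairwise_cons.mp hpt).1 h hmem1
      exact absurd this (not_le.mpr hlt)

lemma lookup_rle_eq_count (xs : List String) (hs : xs.Pairwise (· ≤ ·)) (s : String) :
    pvLookup (pvRle xs) s = xs.count s := by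
  induction xs using pvRle.induct with
  | case1 => simp [pvRle, pvLookup]
  | case2 h t rest ih =>
    rw [pvRle]
    simp only [pvLookup]
    have hsplit : t = t.takeWhile (· == h) ++ t.dropWhile (· == h) :=
      (List.takeWhile_append_dropWhile).symm
    have hrestp : (t.dropWhile (· == h)).Pairwise (· ≤ ·) :=
      (hs.of_cons).sublist (List.dropWhile_sublist _)
    by_cases he : h = s
    · subst he
      simp only [beq_self_eq_true, if_true]
      have h1 : (t.takeWhile (· == h)).count h = (t.takeWhile (· == h)).length := by
        rw [List.count_eq_length]
        intro y hy
        have hby := List.mem_takeWhile_imp hy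
        exact (beq_iff_eq.mp hby).symm
      have h2 : t.count h = (t.takeWhile (· == h)).length := by
        conv_lhs => rw [hsplit]
        rw [List.count_append, h1, count_dropWhile_eq_zero h t hs, Nat.add_zero]
      rw [List.count_cons_self, h2]
      push_cast; ring
    · have hb : (h == s) = false := by simpa using he
      simp only [hb, Bool.false_eq_true, if_false]
      rw [ih hrestp]
      have h3 : (t.takeWhile (· == h)).count s = 0 := by
        rw [List.count_eq_zero]
        intro hy
        have hby := List.mem_takeWhile_imp (p := (· == h)) hy
        exact he (beq_iff_eq.mp hby).symm
      have h4 : t.count s = (t.dropWhile (· == h)).count s := by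
        conv_lhs => rw [hsplit]
        rw [List.count_append, h3, Nat.zero_add]
      have h5 : (h :: t).count s = (t.dropWhile (· == h)).count s := by
        rw [List.count_cons, hb, if_neg (by simp), Nat.add_zero]
        exact h4
      have hre : rest = t.dropWhile (· == h) := rfl
      rw [hre, h5]

-- A's Counter lookup equals B's sorted-RLE lookup
lemma counter_getD_eq_lookup (ys : List String) (s : String) :
    (PySem.Dict.counter ys).getD s 0
      = pvLookup (pvRle (PySem.List.sorted ys (fun x => x) false)) s := by
  rw [PySem.Dict.getD_counter,
      lookup_rle_eq_count _ (by simpa using PySem.List.sorted_pairwise ys (fun x => x)) s,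
      (PySem.List.sorted_perm ys (fun x => x) false).count_eq]

-- joining the five chips with the divider is A's explicit concatenation
lemma join_five (d a b c e f : String) :
    PySem.Str.join d [a, b, c, e, f] = a ++ d ++ b ++ d ++ c ++ d ++ e ++ d ++ f := by
  simp [PySem.Str.join, PySem.Chars.join, List.intercalate]
  apply String.toList_injective
  simp [List.append_assoc]

-- ===== VERDICT (by name: the statement is the Claim_ definition above) =====
theorem build_task_snapshot_spec : Claim_equal_build_task_snapshot := by
  intro metrics running _
  unfold Spec_build_task_snapshot build_task_snapshot build_task_snapshot_alt
  simp only [List.map_cons, List.map_nil, join_five, counter_getD_eq_lookup, pvDIVIDER]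
  apply congrArg
  simp [String.append_assoc]
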